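-- pv_equiv track=rewrite | github.com/Qalfredo/netwatch-cli | netwatch/reporter/isp_evidence.py | _consecutive_failures
-- ===== SOURCE A (Python) =====
-- def _consecutive_failures(rows: list[dict[str, str]]) -> int:
--     """Return the length of the longest consecutive run of below_contract=true or failed rows."""
--     best = 0
--     current = 0
--     for row in rows:
--         bad = (
--             row.get("below_contract", "").lower() == "true"
--             or bool(row.get("error_message", "").strip())
--         )
--         if bad:
--             current += 1
--             best = max(best, current)
--         else:
--             current = 0
--     return best
-- ===== SOURCE B (Python) =====
-- def _consecutive_failures(rows: list[dict[str, str]]) -> int: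
--     """Gap formulation: a maximal run of bad rows is exactly the span between two
--     consecutive GOOD positions (with sentinels -1 and len(rows)); the answer is
--     the largest such gap."""
--     n = len(rows)
--     goods = [-1] + [
--         i for i, row in enumerate(rows)
--         if not (row.get("below_contract", "").lower() == "true"
--                 or bool(row.get("error_message", "").strip()))
--     ] + [n]
--     return max(b - a - 1 for a, b in zip(goods, goods[1:]))
-- ===== Notes on version B (the rewrite author's own statement) =====
-- stated objective: alternative
-- what changed: A scans with running best/current counters; B instead collects the positions of GOOD rows (with sentinels -1 and n) and returns the maximum gap between consecutive good positions, i.e. it reduces longest-bad-run to a max over boundary differences.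
import Mathlib
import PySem

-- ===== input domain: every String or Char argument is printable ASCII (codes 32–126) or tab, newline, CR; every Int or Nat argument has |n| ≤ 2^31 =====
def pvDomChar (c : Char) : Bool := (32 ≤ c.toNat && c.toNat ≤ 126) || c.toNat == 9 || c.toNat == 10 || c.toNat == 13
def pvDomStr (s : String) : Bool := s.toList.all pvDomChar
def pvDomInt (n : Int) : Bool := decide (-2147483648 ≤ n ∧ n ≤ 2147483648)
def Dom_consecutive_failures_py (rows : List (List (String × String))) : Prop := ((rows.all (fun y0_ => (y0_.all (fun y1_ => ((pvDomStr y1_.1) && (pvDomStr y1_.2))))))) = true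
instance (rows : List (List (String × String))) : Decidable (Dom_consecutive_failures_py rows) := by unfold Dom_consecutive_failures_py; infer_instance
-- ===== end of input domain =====

-- B replaces A's running best/current counter scan by a gap formulation: collect the
-- positions of GOOD rows (with sentinels -1 and n) and return the maximum gap between
-- consecutive good positions (alternative algorithm, same cost).

-- ===== PORT A =====
-- row.get(k, "") on a dict (assoc list, first match)
def pvRowGet (row : List (String × String)) (k : String) : String :=
  ((row.find? (fun p => p.1 == k)).map Prod.snd).getD ""

-- the shared bad-row predicate (identical character-for-character in A and B)
def pvBadRow (row : List (String × String)) : Bool :=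
  (PySem.Str.lower (pvRowGet row "below_contract") == "true")
    || (!(PySem.Str.strip (pvRowGet row "error_message") == ""))

def consecutive_failures_py (rows : List (List (String × String))) : Int :=
  (rows.foldl (fun (st : Int × Int) row =>
      if pvBadRow row then (max st.1 (st.2 + 1), st.2 + 1) else (st.1, 0))
    (0, 0)).1

-- ===== PORT B =====
def consecutive_failures_py_alt (rows : List (List (String × String))) : Int :=
  let n : Int := rows.length
  -- [-1] + [i for i, row in enumerate(rows) if not bad(row)] + [n]
  let goods : List Int :=
    [-1] ++ ((PySem.List.enumerate rows).filter (fun p => !pvBadRow p.2)).map (fun p => p.1) ++ [n]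
  -- max(b - a - 1 for a, b in zip(goods, goods[1:])); goods[1:] = goods.tail here, and
  -- goods has ≥ 2 elements, so max sees a nonempty list (its .getD default is never consulted)
  (PySem.List.max? ((goods.zip goods.tail).map (fun p => p.2 - p.1 - 1)) (fun x => x)).getD 0

-- ===== PRECONDITION & SPEC =====
def Spec_consecutive_failures_py (rows : List (List (String × String))) (out : Int) : Prop := out = consecutive_failures_py_alt rows
instance (rows : List (List (String × String))) (out : Int) : Decidable (Spec_consecutive_failures_py rows out) := by unfold Spec_consecutive_failures_py; infer_instance

-- ===== CLAIM (what is proved, stated in full; the proofs are below) =====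
def Claim_equal_consecutive_failures_py : Prop := ∀ (rows : List (List (String × String))), Dom_consecutive_failures_py rows → Spec_consecutive_failures_py rows (consecutive_failures_py rows)

-- ===== LEMMAS AND PROOFS =====

-- A's loop body and fold, named for the proofs (definitionally A's port)
def pvAStep (st : Int × Int) (row : List (String × String)) : Int × Int :=
  if pvBadRow row then (max st.1 (st.2 + 1), st.2 + 1) else (st.1, 0)

def pvAFold (rows : List (List (String × String))) : Int × Int :=
  rows.foldl pvAStep (0, 0)

-- maximum of a nonempty list (the value max(...) computes)
def pvListMax : List Int → Int
  | [] => 0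
  | h :: t => t.foldl max h

theorem pvListMax_concat (l : List Int) (hl : l ≠ []) (x : Int) :
    pvListMax (l ++ [x]) = max (pvListMax l) x := by
  cases l with
  | nil => exact absurd rfl hl
  | cons h t => simp [pvListMax, List.foldl_append]

theorem pvMax?_getD_eq_pvListMax (l : List Int) (hl : l ≠ []) :
    (PySem.List.max? l (fun x => x)).getD 0 = pvListMax l := by
  cases l with
  | nil => exact absurd rfl hl
  | cons h t => simp [PySem.List.max?_id_cons, pvListMax]

-- successive gaps b - a - 1 along a list, starting from a previous element
def pvGaps : Int → List Int → List Int
  | _, [] => []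
  | a, b :: t => (b - a - 1) :: pvGaps b t

theorem pvZip_gaps (l : List Int) : ∀ a : Int,
    (((a :: l).zip l).map (fun p => p.2 - p.1 - 1)) = pvGaps a l := by
  induction l with
  | nil => intro a; rfl
  | cons b t ih => intro a; simp [pvGaps, ← ih b]

theorem pvGaps_concat (G : List Int) : ∀ (a x : Int),
    pvGaps a (G ++ [x]) = pvGaps a G ++ [x - G.getLastD a - 1] := by
  induction G with
  | nil => intro a x; rfl
  | cons b t ih =>
    intro a x
    simp [pvGaps, ih b]
    cases t with
    | nil => simp
    | cons c u =>
      have hs : ((c :: u).getLast?).isSome := by simp [List.getLast?_isSome]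
      obtain ⟨y, hy⟩ := Option.isSome_iff_exists.mp hs
      simp [hy]

theorem pvGaps_ne_nil (a x : Int) (G : List Int) : pvGaps a (G ++ [x]) ≠ [] := by
  cases G <;> simp [pvGaps]

theorem pvListMax_bump (pre : List Int) (c : Int) :
    pvListMax (pre ++ [c + 1]) = max (pvListMax (pre ++ [c])) (c + 1) := by
  cases pre with
  | nil => simp [pvListMax]
  | cons h t =>
    rw [pvListMax_concat (h :: t) (by simp) (c + 1), pvListMax_concat (h :: t) (by simp) c,
      max_assoc]
    congr 1
    omega

-- the good positions of rows (the middle part of B's goods list)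
def pvGood (rows : List (List (String × String))) : List Int :=
  ((PySem.List.enumerate rows).filter (fun p => !pvBadRow p.2)).map (fun p => p.1)

theorem pvGood_append_singleton (rows : List (List (String × String))) (r : List (String × String)) :
    pvGood (rows ++ [r]) =
      pvGood rows ++ (if pvBadRow r then [] else [(rows.length : Int)]) := by
  simp only [pvGood, PySem.List.enumerate_append]
  rw [List.filter_append, List.map_append]
  cases h : pvBadRow r <;> simp [PySem.List.enumerate, h]

-- main invariant: A's fold state vs B's good-position gaps
theorem pvInvariant (rows : List (List (String × String))) :
    0 ≤ (pvAFold rows).1 ∧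
    (pvAFold rows).2 = (rows.length : Int) - (pvGood rows).getLastD (-1) - 1 ∧
    (pvAFold rows).1 = pvListMax (pvGaps (-1) (pvGood rows ++ [(rows.length : Int)])) := by
  induction rows using List.reverseRecOn with
  | nil =>
    refine ⟨le_refl 0, ?_, ?_⟩
    · simp [pvAFold, pvGood, PySem.List.enumerate]
    · simp [pvAFold, pvGood, PySem.List.enumerate, pvGaps, pvListMax]
  | append_singleton rows r ih =>
    obtain ⟨hnn, hcur, hbest⟩ := ih
    have hfold : pvAFold (rows ++ [r]) = pvAStep (pvAFold rows) r := by
      simp [pvAFold, List.foldl_append]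
    have hlen : ((rows ++ [r]).length : Int) = (rows.length : Int) + 1 := by simp
    cases hb : pvBadRow r with
    | true =>
      have hG : pvGood (rows ++ [r]) = pvGood rows := by
        simp [pvGood_append_singleton, hb]
      have hstep : pvAFold (rows ++ [r])
          = (max (pvAFold rows).1 ((pvAFold rows).2 + 1), (pvAFold rows).2 + 1) := by
        rw [hfold]; simp [pvAStep, hb]
      refine ⟨?_, ?_, ?_⟩
      · rw [hstep]; simp; omega
      · rw [hstep, hG, hlen]
        simp only [List.getLastD_eq_getLast?] at hcur ⊢
        omega
      · rw [hstep, hG, hlen, pvGaps_concat (pvGood rows) (-1) ((rows.length : Int) + 1)]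
        have h1 : (rows.length : Int) + 1 - (pvGood rows).getLastD (-1) - 1
            = (pvAFold rows).2 + 1 := by omega
        rw [h1, pvListMax_bump (pvGaps (-1) (pvGood rows)) (pvAFold rows).2]
        have h2 : pvGaps (-1) (pvGood rows) ++ [(pvAFold rows).2]
            = pvGaps (-1) (pvGood rows ++ [(rows.length : Int)]) := by
          rw [pvGaps_concat (pvGood rows) (-1) (rows.length : Int), hcur]
        rw [h2, ← hbest]
    | false =>
      have hG : pvGood (rows ++ [r]) = pvGood rows ++ [(rows.length : Int)] := by
        simp [pvGood_append_singleton, hb]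
      have hstep : pvAFold (rows ++ [r]) = ((pvAFold rows).1, 0) := by
        rw [hfold]; simp [pvAStep, hb]
      refine ⟨?_, ?_, ?_⟩
      · rw [hstep]; exact hnn
      · rw [hstep, hG, hlen]; simp
      · rw [hstep, hG, hlen,
          pvGaps_concat (pvGood rows ++ [(rows.length : Int)]) (-1) ((rows.length : Int) + 1)]
        rw [pvListMax_concat _ (pvGaps_ne_nil _ _ _)]
        simp only [List.getLastD_concat]
        have h0 : (rows.length : Int) + 1 - (rows.length : Int) - 1 = 0 := by ring
        rw [h0, ← hbest, max_eq_left hnn]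

-- ===== VERDICT (by name: the statement is the Claim_ definition above) =====
theorem consecutive_failures_py_spec : Claim_equal_consecutive_failures_py := by
  intro rows _
  show consecutive_failures_py rows = consecutive_failures_py_alt rows
  obtain ⟨_, _, hbest⟩ := pvInvariant rows
  have hA : consecutive_failures_py rows = (pvAFold rows).1 := rfl
  unfold consecutive_failures_py_alt
  have hzip : (((([-1] ++ pvGood rows ++ [(rows.length : Int)]) :
        List Int).zip ([-1] ++ pvGood rows ++ [(rows.length : Int)]).tail).map
        (fun p : Int × Int => p.2 - p.1 - 1))
      = pvGaps (-1) (pvGood rows ++ [(rows.length : Int)]) := by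
    simpa using pvZip_gaps (pvGood rows ++ [(rows.length : Int)]) (-1)
  show consecutive_failures_py rows =
    (PySem.List.max? ((([-1] ++ pvGood rows ++ [(rows.length : Int)]).zip
      ([-1] ++ pvGood rows ++ [(rows.length : Int)]).tail).map (fun p : Int × Int => p.2 - p.1 - 1))
      (fun x : Int => x)).getD 0
  rw [hzip, pvMax?_getD_eq_pvListMax _ (pvGaps_ne_nil _ _ _), hA, hbest]
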